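-- pv_equiv track=rewrite | github.com/dimalei/advent_of_code_2024 | 09_disk_fragmenter/disk_fragmenter.py | find_free_space
-- ===== SOURCE A (Python) =====
-- def find_free_space(file: list, disk: list):
--     file_size = len(file)
--     file_index = disk.index(file[0])
--     index = 0
--     while index < len(disk) and index < file_index:
--         free_space = 1
--         if disk[index] == '.':
--             while index + free_space < len(disk) and disk[index + free_space] == '.':
--                 free_space += 1
--             if free_space >= file_size:
--                 return index
--             index += free_space
--         else:
--             index += 1
--     return -1
-- ===== SOURCE B (Python) =====
-- def find_free_space(file: list, disk: list):
--     file_index = disk.index(file[0])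
--     # phase 1: table of all maximal runs of equal characters: (start, char, length)
--     runs = []
--     i, n = 0, len(disk)
--     while i < n:
--         j = i
--         while j < n and disk[j] == disk[i]:
--             j += 1
--         runs.append((i, disk[i], j - i))
--         i = j
--     # phase 2: first '.' run that starts before the file and is big enough
--     for start, ch, length in runs:
--         if ch == '.' and start < file_index and length >= len(file):
--             return start
--     return -1
-- ===== Notes on version B (the rewrite author's own statement) =====
-- stated objective: alternative
-- what changed: Replaced A's single interleaved scan (step-by-one over non-gap cells, count-and-jump over gaps, early exit at file_index) by a two-phase algorithm: first build a table of all maximal runs of equal characters, then scan the table for the first '.' run with start < file_index and length >= len(file).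
import Mathlib
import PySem

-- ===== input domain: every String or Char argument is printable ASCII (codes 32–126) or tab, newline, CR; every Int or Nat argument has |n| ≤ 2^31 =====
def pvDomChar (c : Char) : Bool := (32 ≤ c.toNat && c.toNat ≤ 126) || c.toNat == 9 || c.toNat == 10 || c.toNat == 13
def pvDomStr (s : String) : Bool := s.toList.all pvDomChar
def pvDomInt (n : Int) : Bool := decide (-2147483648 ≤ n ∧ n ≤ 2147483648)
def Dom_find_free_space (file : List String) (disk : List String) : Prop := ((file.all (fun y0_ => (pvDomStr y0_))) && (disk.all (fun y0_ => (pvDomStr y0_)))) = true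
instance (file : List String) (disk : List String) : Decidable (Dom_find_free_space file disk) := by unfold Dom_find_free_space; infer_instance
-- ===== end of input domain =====

-- ===== PORT A =====
-- B changes the decomposition (run table + filter instead of A's interleaved scan); same inputs raise in both.
-- A's while loops, transliterated: innerA is the inner free-space counter, loopA the outer scan.
def innerA (disk : List String) (index : Nat) (free : Nat) : Nat :=
  if index + free < disk.length ∧ disk.getD (index + free) "" = "." then
    innerA disk index (free + 1)
  else free
termination_by disk.length - (index + free)
decreasing_by omega

theorem innerA_ge (disk : List String) (index free : Nat) : free ≤ innerA disk index free := by
  fun_induction innerA disk index free with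
  | case1 _ _ ih => omega
  | case2 => omega

def loopA (disk : List String) (file_size : Nat) (file_index : Nat) (index : Nat) : Int :=
  if index < disk.length ∧ index < file_index then
    if disk.getD index "" = "." then
      let free := innerA disk index 1
      if file_size ≤ free then (index : Int)
      else loopA disk file_size file_index (index + free)
    else loopA disk file_size file_index (index + 1)
  else -1
termination_by file_index - index
decreasing_by
  · have := innerA_ge disk index 1; omega
  · omega

def find_free_space (file : List String) (disk : List String) : Int :=
  match PySem.List.pyGet? file 0 with
  | none => 0  -- file[0] raises IndexError: outside Pre_
  | some f0 =>
    match PySem.List.index? disk f0 with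
    | none => 0  -- disk.index raises ValueError: outside Pre_
    | some fi => loopA disk file.length fi 0

-- ===== PORT B =====
-- Source B's inner while: end index of the maximal run of character c starting at j
def runEnd (disk : List String) (c : String) (j : Nat) : Nat :=
  if j < disk.length ∧ disk.getD j "" = c then runEnd disk c (j + 1) else j
termination_by disk.length - j
decreasing_by omega

theorem runEnd_ge (disk : List String) (c : String) (j : Nat) : j ≤ runEnd disk c j := by
  fun_induction runEnd disk c j with
  | case1 _ _ ih => omega
  | case2 => omega

theorem runEnd_le (disk : List String) (c : String) (j : Nat) (h : j ≤ disk.length) :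
    runEnd disk c j ≤ disk.length := by
  fun_induction runEnd disk c j with
  | case1 j h1 ih => exact ih (by omega)
  | case2 j h1 => omega

-- Source B's phase 1 (outer while): the table of maximal runs (start, char, length) from position i
def runsFrom (disk : List String) (i : Nat) : List (Nat × String × Nat) :=
  if h : i < disk.length then
    (i, disk.getD i "", runEnd disk (disk.getD i "") i - i) :: runsFrom disk (runEnd disk (disk.getD i "") i)
  else []
termination_by disk.length - i
decreasing_by
  have h1 : i + 1 ≤ runEnd disk (disk.getD i "") (i + 1) := runEnd_ge disk _ (i + 1)
  have h2 : runEnd disk (disk.getD i "") i = runEnd disk (disk.getD i "") (i + 1) := by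
    rw [runEnd]; simp [h]
  have h3 : runEnd disk (disk.getD i "") (i + 1) ≤ disk.length :=
    runEnd_le disk _ (i + 1) (by omega)
  omega

-- Source B's phase 2 (for loop over the run table)
def scanRuns (runs : List (Nat × String × Nat)) (file_index : Nat) (file_size : Nat) : Int :=
  match runs with
  | [] => -1
  | (s, c, l) :: rest =>
    if c = "." ∧ s < file_index ∧ file_size ≤ l then (s : Int)
    else scanRuns rest file_index file_size

def find_free_space_alt (file : List String) (disk : List String) : Int :=
  match PySem.List.pyGet? file 0 with
  | none => 0  -- file[0] raises IndexError: outside Pre_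
  | some f0 =>
    match PySem.List.index? disk f0 with
    | none => 0  -- disk.index raises ValueError: outside Pre_
    | some fi => scanRuns (runsFrom disk 0) fi file.length

-- ===== PRECONDITION & SPEC =====
-- Pre_ excludes exactly the inputs where A raises: file empty (IndexError on file[0])
-- or file[0] not in disk (ValueError from disk.index); B raises there too.
def Pre_find_free_space (file : List String) (disk : List String) : Prop :=
  file ≠ [] ∧ file.headD "" ∈ disk
instance (file : List String) (disk : List String) : Decidable (Pre_find_free_space file disk) := by
  unfold Pre_find_free_space; infer_instance

def pvWitness_find_free_space : List String × List String :=
  (["1"], [".", ".", "1", "."])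

def Spec_find_free_space (file : List String) (disk : List String) (out : Int) : Prop := out = find_free_space_alt file disk
instance (file : List String) (disk : List String) (out : Int) : Decidable (Spec_find_free_space file disk out) := by unfold Spec_find_free_space; infer_instance

-- ===== CLAIM (what is proved, stated in full; the proofs are below) =====
def Claim_equal_find_free_space : Prop := ∀ (file : List String) (disk : List String), Dom_find_free_space file disk → Pre_find_free_space file disk → Spec_find_free_space file disk (find_free_space file disk)

-- ===== LEMMAS AND PROOFS =====

theorem starts_ge (disk : List String) (i : Nat) :
    ∀ p ∈ runsFrom disk i, i ≤ p.1 := by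
  fun_induction runsFrom disk i with
  | case1 i h ih =>
    intro p hp
    rcases List.mem_cons.mp hp with h' | h'
    · subst h'; exact le_refl i
    · have := ih p h'
      have := runEnd_ge disk (disk.getD i "") i
      omega
  | case2 => intro p hp; simp at hp

theorem scanRuns_of_ge (runs : List (Nat × String × Nat)) (fi fs : Nat)
    (h : ∀ p ∈ runs, fi ≤ p.1) : scanRuns runs fi fs = -1 := by
  induction runs with
  | nil => rfl
  | cons p rest ih =>
    obtain ⟨s, c, l⟩ := p
    have hs : fi ≤ s := h (s, c, l) (by simp)
    have : ¬ (c = "." ∧ s < fi ∧ fs ≤ l) := by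
      rintro ⟨_, h2, _⟩; omega
    rw [scanRuns, if_neg this]
    exact ih (fun p hp => h p (List.mem_cons_of_mem _ hp))

theorem innerA_eq_runEnd (disk : List String) (i free : Nat) :
    i + innerA disk i free = runEnd disk "." (i + free) := by
  fun_induction innerA disk i free with
  | case1 free h ih =>
    rw [runEnd, if_pos h, ih, Nat.add_assoc]
  | case2 free h =>
    rw [runEnd, if_neg h]

theorem runsFrom_cons (disk : List String) (i : Nat) (h : i < disk.length) :
    runsFrom disk i =
      (i, disk.getD i "", runEnd disk (disk.getD i "") i - i) ::
        runsFrom disk (runEnd disk (disk.getD i "") i) := by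
  rw [runsFrom]; simp [h]

theorem loopA_eq_scan (disk : List String) (fs fi i : Nat) :
    loopA disk fs fi i = scanRuns (runsFrom disk i) fi fs := by
  fun_induction loopA disk fs fi i with
  | case1 i hcond hdot free hfs =>
    obtain ⟨hlen, hfi⟩ := hcond
    have hj : runEnd disk (disk.getD i "") i = i + innerA disk i 1 := by
      rw [hdot, runEnd, if_pos ⟨hlen, hdot⟩]
      exact (innerA_eq_runEnd disk i 1).symm
    rw [runsFrom_cons disk i hlen, hj]
    simp only [scanRuns]
    rw [if_pos ⟨hdot, hfi, by omega⟩]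
  | case2 i hcond hdot free hfs ih =>
    obtain ⟨hlen, hfi⟩ := hcond
    have hj : runEnd disk (disk.getD i "") i = i + innerA disk i 1 := by
      rw [hdot, runEnd, if_pos ⟨hlen, hdot⟩]
      exact (innerA_eq_runEnd disk i 1).symm
    rw [runsFrom_cons disk i hlen, hj]
    simp only [scanRuns]
    rw [if_neg (by rintro ⟨_, _, h3⟩; omega)]
    exact ih
  | case3 i hcond hdot ih =>
    obtain ⟨hlen, hfi⟩ := hcond
    rw [runsFrom_cons disk i hlen]
    simp only [scanRuns]
    rw [if_neg (by rintro ⟨h1, _, _⟩; exact hdot h1)]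
    have hstep : runEnd disk (disk.getD i "") i = runEnd disk (disk.getD i "") (i + 1) := by
      rw [runEnd, if_pos ⟨hlen, rfl⟩]
    rw [ih, hstep]
    by_cases hcont : i + 1 < disk.length ∧ disk.getD (i + 1) "" = disk.getD i ""
    · obtain ⟨hlen1, heq1⟩ := hcont
      rw [runsFrom_cons disk (i + 1) hlen1, heq1]
      simp only [scanRuns]
      rw [if_neg (by rintro ⟨h1, _, _⟩; exact hdot h1)]
    · have hend : runEnd disk (disk.getD i "") (i + 1) = i + 1 := by
        rw [runEnd, if_neg (by rintro ⟨h1, h2⟩; exact hcont ⟨h1, h2⟩)]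
      rw [hend]
  | case4 i hcond =>
    by_cases hlen : i < disk.length
    · have hfi : fi ≤ i := by omega
      exact (scanRuns_of_ge _ fi fs
        (fun p hp => le_trans hfi (starts_ge disk i p hp))).symm
    · rw [runsFrom]
      simp [hlen, scanRuns]

-- ===== VERDICT (by name: the statement is the Claim_ definition above) =====
theorem find_free_space_spec : Claim_equal_find_free_space := by
  intro file disk _ _
  unfold Spec_find_free_space find_free_space find_free_space_alt
  cases PySem.List.pyGet? file 0 with
  | none => rfl
  | some f0 =>
    simp only
    cases PySem.List.index? disk f0 with
    | none => rfl
    | some fi =>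
      simp only
      exact loopA_eq_scan disk file.length fi 0
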